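-- pv_equiv track=rewrite | github.com/its-paradox/Keyed_Transposition_Cipher | helping_methods.py | find_sol2
-- ===== SOURCE A (Python) =====
-- def find_sol2(x1, c):
--     x = x1.upper()
--     l1 = []
--
--     for i in range(26):
--         l1.append(chr(i+65))
--
--     count = 1 + c
--     for i in l1:
--         if i == x:
--             return count
--         else:
--             count += 1
-- ===== SOURCE B (Python) =====
-- def find_sol2(x1, c):
--     x = x1.upper()
--     if len(x) != 1:
--         return None
--     o = ord(x)
--     if 65 <= o <= 90:
--         return o - 64 + c
--     return None
-- ===== Notes on version B (the rewrite author's own statement) =====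
-- stated objective: simpler
-- what changed: Replaces building a 26-letter alphabet list and linearly scanning it with a counter by a direct arithmetic computation from the character code (ord), guarded so non-single-letter inputs yield None exactly as A's loop falling through does.
import Mathlib
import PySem

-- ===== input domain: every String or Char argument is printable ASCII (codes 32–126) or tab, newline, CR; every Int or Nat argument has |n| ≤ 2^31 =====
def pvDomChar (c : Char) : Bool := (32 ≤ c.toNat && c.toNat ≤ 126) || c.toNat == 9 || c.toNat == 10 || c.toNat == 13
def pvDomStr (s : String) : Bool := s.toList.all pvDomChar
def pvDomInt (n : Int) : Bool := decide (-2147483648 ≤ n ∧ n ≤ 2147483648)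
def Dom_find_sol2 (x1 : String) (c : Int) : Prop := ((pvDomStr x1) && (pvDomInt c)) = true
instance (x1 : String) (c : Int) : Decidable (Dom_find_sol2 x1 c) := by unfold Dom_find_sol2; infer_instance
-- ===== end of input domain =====

-- B replaces A's 26-element alphabet list and linear scan by a direct arithmetic
-- computation from the character code (simpler; same behaviour, including None
-- for inputs that are not a single letter).


-- ===== PORT A =====
-- the second for-loop of A: scan the alphabet, returning count at the match
def findSol2Scan (l : List Char) (x : List Char) (count : Int) : Option Int :=
  match l with
  | [] => none
  | i :: rest => if [i] = x then some count else findSol2Scan rest x (count + 1)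

def find_sol2 (x1 : String) (c : Int) : Option Int :=
  let x := PySem.Chars.upper x1.toList
  let l1 := (PySem.List.pyRange 0 26 1).foldl (fun acc i => acc ++ [Char.ofNat (i + 65).toNat]) []
  findSol2Scan l1 x (1 + c)

-- ===== PORT B =====
def find_sol2_alt (x1 : String) (c : Int) : Option Int :=
  match PySem.Chars.upper x1.toList with
  | [ch] =>
      let o : Int := ch.toNat
      if 65 ≤ o ∧ o ≤ 90 then some (o - 64 + c) else none
  | _ => none

-- ===== PRECONDITION & SPEC =====
def Spec_find_sol2 (x1 : String) (c : Int) (out : Option Int) : Prop := out = find_sol2_alt x1 c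
instance (x1 : String) (c : Int) (out : Option Int) : Decidable (Spec_find_sol2 x1 c out) := by unfold Spec_find_sol2; infer_instance

-- ===== CLAIM (what is proved, stated in full; the proofs are below) =====
def Claim_equal_find_sol2 : Prop := ∀ (x1 : String) (c : Int), Dom_find_sol2 x1 c → Spec_find_sol2 x1 c (find_sol2 x1 c)

-- ===== LEMMAS AND PROOFS =====

theorem char_toNat_ofNat (n : Nat) (h : n < 1000) : (Char.ofNat n).toNat = n := by
  unfold Char.ofNat Char.toNat
  rw [dif_pos (by constructor; omega)]
  rfl

-- if x is not a singleton, the scan never matches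
theorem scan_non_singleton (l x : List Char) (count : Int) (hx : x.length ≠ 1) :
    findSol2Scan l x count = none := by
  induction l generalizing count with
  | nil => rfl
  | cons a rest ih =>
      unfold findSol2Scan
      rw [if_neg (by intro he; apply hx; rw [← he]; rfl)]
      exact ih _

-- scanning a block of consecutive character codes against a singleton
theorem scan_range (n : Nat) (base : Nat) (h : base + n ≤ 1000) (ch : Char) (count : Int) :
    findSol2Scan ((List.range' base n).map Char.ofNat) [ch] count
      = if base ≤ ch.toNat ∧ ch.toNat < base + n
        then some (count + ((ch.toNat : Int) - base)) else none := by
  induction n generalizing base count with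
  | zero => simp [findSol2Scan]
  | succ m ih =>
      rw [List.range'_succ, List.map_cons]
      unfold findSol2Scan
      by_cases hb : ch.toNat = base
      · rw [if_pos]
        · rw [if_pos (by omega)]
          congr 1
          omega
        · have : Char.ofNat base = ch := by
            have := Char.ofNat_toNat ch
            rw [hb] at this
            exact this
          rw [this]
      · rw [if_neg, ih (base + 1) (by omega)]
        · have harith : base + 1 + m = base + (m + 1) := by omega
          rw [harith]
          split_ifs with h1 h2 h2
          · congr 1; omega
          · omega
          · omega
          · rfl
        · intro he
          apply hb
          have : (Char.ofNat base).toNat = ch.toNat := by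
            rw [List.cons.injEq] at he
            rw [he.1]
          rw [char_toNat_ofNat base (by omega)] at this
          omega

-- A's alphabet list is the characters with codes 65..90
theorem alphabet_eq :
    (PySem.List.pyRange 0 26 1).foldl (fun acc i => acc ++ [Char.ofNat (i + 65).toNat]) []
      = (List.range' 65 26).map Char.ofNat := by decide

-- ===== VERDICT (by name: the statement is the Claim_ definition above) =====
theorem find_sol2_spec : Claim_equal_find_sol2 := by
  intro x1 c _
  unfold Spec_find_sol2 find_sol2 find_sol2_alt
  rw [alphabet_eq]
  match hx : PySem.Chars.upper x1.toList with
  | [] => exact scan_non_singleton _ _ _ (by simp)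
  | a :: b :: t => exact scan_non_singleton _ _ _ (by simp)
  | [ch] =>
      rw [scan_range 26 65 (by omega) ch (1 + c)]
      dsimp only
      split_ifs with h1 h2 <;> first
        | (congr 1; omega)
        | omega
        | rfl
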